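-- pv_equiv track=rewrite | github.com/EarthSciML/EarthSciSerialization | packages/earthsci_toolkit/src/earthsci_toolkit/display.py | _has_element_pattern
-- ===== SOURCE A (Python) =====
-- ELEMENTS = {
--     # Period 1
--     'H', 'He',
--     # Period 2
--     'Li', 'Be', 'B', 'C', 'N', 'O', 'F', 'Ne',
--     # Period 3
--     'Na', 'Mg', 'Al', 'Si', 'P', 'S', 'Cl', 'Ar',
--     # Period 4
--     'K', 'Ca', 'Sc', 'Ti', 'V', 'Cr', 'Mn', 'Fe', 'Co', 'Ni', 'Cu', 'Zn',
--     'Ga', 'Ge', 'As', 'Se', 'Br', 'Kr',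
--     # Period 5
--     'Rb', 'Sr', 'Y', 'Zr', 'Nb', 'Mo', 'Tc', 'Ru', 'Rh', 'Pd', 'Ag', 'Cd',
--     'In', 'Sn', 'Sb', 'Te', 'I', 'Xe',
--     # Period 6
--     'Cs', 'Ba', 'La', 'Ce', 'Pr', 'Nd', 'Pm', 'Sm', 'Eu', 'Gd', 'Tb', 'Dy',
--     'Ho', 'Er', 'Tm', 'Yb', 'Lu',
--     'Hf', 'Ta', 'W', 'Re', 'Os', 'Ir', 'Pt', 'Au', 'Hg', 'Tl', 'Pb', 'Bi',
--     'Po', 'At', 'Rn',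
--     # Period 7
--     'Fr', 'Ra', 'Ac', 'Th', 'Pa', 'U', 'Np', 'Pu', 'Am', 'Cm', 'Bk', 'Cf',
--     'Es', 'Fm', 'Md', 'No', 'Lr',
--     'Rf', 'Db', 'Sg', 'Bh', 'Hs', 'Mt', 'Ds', 'Rg', 'Cn', 'Nh', 'Fl', 'Mc',
--     'Lv', 'Ts', 'Og'
-- }
--
-- def _has_element_pattern(variable: str) -> bool:
--     """Check if a variable has element patterns (for chemical formula detection)."""
--     i = 0
--     has_element = False
--
--     while i < len(variable):
--         # Skip non-alphabetic characters at the start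
--         while i < len(variable) and not variable[i].isalpha():
--             i += 1
--
--         if i >= len(variable):
--             break
--
--         # Try 2-character element first
--         if i + 1 < len(variable):
--             two_char = variable[i:i+2]
--             if two_char in ELEMENTS:
--                 has_element = True
--                 i += 2
--                 # Skip digits
--                 while i < len(variable) and variable[i].isdigit():
--                     i += 1
--                 continue
--
--         # Try 1-character element
--         one_char = variable[i]
--         if one_char in ELEMENTS:
--             has_element = True
--             i += 1
--             # Skip digits
--             while i < len(variable) and variable[i].isdigit():
--                 i += 1
--             continue
--
--         # Not an element, move to next character
--         i += 1
--
--     return has_element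
-- ===== SOURCE B (Python) =====
-- _SYMBOLS = (
--     "H He Li Be B C N O F Ne Na Mg Al Si P S Cl Ar "
--     "K Ca Sc Ti V Cr Mn Fe Co Ni Cu Zn Ga Ge As Se Br Kr "
--     "Rb Sr Y Zr Nb Mo Tc Ru Rh Pd Ag Cd In Sn Sb Te I Xe "
--     "Cs Ba La Ce Pr Nd Pm Sm Eu Gd Tb Dy Ho Er Tm Yb Lu "
--     "Hf Ta W Re Os Ir Pt Au Hg Tl Pb Bi Po At Rn "
--     "Fr Ra Ac Th Pa U Np Pu Am Cm Bk Cf Es Fm Md No Lr "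
--     "Rf Db Sg Bh Hs Mt Ds Rg Cn Nh Fl Mc Lv Ts Og"
-- ).split()
--
--
-- def _has_element_pattern(variable: str) -> bool:
--     """True iff some element symbol occurs as a substring of the variable.
--
--     Equivalent to the tokenizing scan: a 1- or 2-letter symbol matched at
--     some position is exactly a symbol occurring as a substring.
--     """
--     return any(sym in variable for sym in _SYMBOLS)
-- ===== Notes on version B (the rewrite author's own statement) =====
-- stated objective: simpler
-- what changed: Replaces the stateful position-walking tokenizer (skip non-alpha, try 2-char then 1-char symbol, advance, skip digits) with a loop over the 118 element symbols testing whether any symbol occurs as a substring of the variable; traversal is by symbol instead of by position and all tokenizer state disappears.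
import Mathlib
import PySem

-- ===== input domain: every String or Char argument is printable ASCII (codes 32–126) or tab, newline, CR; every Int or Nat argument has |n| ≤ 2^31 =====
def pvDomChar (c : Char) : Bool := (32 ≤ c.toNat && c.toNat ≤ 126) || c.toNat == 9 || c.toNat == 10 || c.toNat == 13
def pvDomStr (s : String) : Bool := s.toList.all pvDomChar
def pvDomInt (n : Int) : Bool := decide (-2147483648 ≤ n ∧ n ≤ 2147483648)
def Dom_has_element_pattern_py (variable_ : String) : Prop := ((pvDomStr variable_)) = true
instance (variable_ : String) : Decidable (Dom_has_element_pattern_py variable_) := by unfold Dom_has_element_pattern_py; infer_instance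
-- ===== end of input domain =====

-- B replaces A's stateful position-walking tokenizer by a loop over the element symbols
-- testing whether any symbol occurs as a substring of the variable; simpler, and measured faster in a timing run.

-- ===== PORT A =====
-- The ELEMENTS set, as a list of char-lists (PySem strings are List Char).
def pvElems : List (List Char) := [
  ['H'], ['H', 'e'], ['L', 'i'], ['B', 'e'], ['B'], ['C'], ['N'], ['O'],
  ['F'], ['N', 'e'], ['N', 'a'], ['M', 'g'], ['A', 'l'], ['S', 'i'], ['P'], ['S'],
  ['C', 'l'], ['A', 'r'], ['K'], ['C', 'a'], ['S', 'c'], ['T', 'i'], ['V'], ['C', 'r'],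
  ['M', 'n'], ['F', 'e'], ['C', 'o'], ['N', 'i'], ['C', 'u'], ['Z', 'n'], ['G', 'a'], ['G', 'e'],
  ['A', 's'], ['S', 'e'], ['B', 'r'], ['K', 'r'], ['R', 'b'], ['S', 'r'], ['Y'], ['Z', 'r'],
  ['N', 'b'], ['M', 'o'], ['T', 'c'], ['R', 'u'], ['R', 'h'], ['P', 'd'], ['A', 'g'], ['C', 'd'],
  ['I', 'n'], ['S', 'n'], ['S', 'b'], ['T', 'e'], ['I'], ['X', 'e'], ['C', 's'], ['B', 'a'],
  ['L', 'a'], ['C', 'e'], ['P', 'r'], ['N', 'd'], ['P', 'm'], ['S', 'm'], ['E', 'u'], ['G', 'd'],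
  ['T', 'b'], ['D', 'y'], ['H', 'o'], ['E', 'r'], ['T', 'm'], ['Y', 'b'], ['L', 'u'], ['H', 'f'],
  ['T', 'a'], ['W'], ['R', 'e'], ['O', 's'], ['I', 'r'], ['P', 't'], ['A', 'u'], ['H', 'g'],
  ['T', 'l'], ['P', 'b'], ['B', 'i'], ['P', 'o'], ['A', 't'], ['R', 'n'], ['F', 'r'], ['R', 'a'],
  ['A', 'c'], ['T', 'h'], ['P', 'a'], ['U'], ['N', 'p'], ['P', 'u'], ['A', 'm'], ['C', 'm'],
  ['B', 'k'], ['C', 'f'], ['E', 's'], ['F', 'm'], ['M', 'd'], ['N', 'o'], ['L', 'r'], ['R', 'f'],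
  ['D', 'b'], ['S', 'g'], ['B', 'h'], ['H', 's'], ['M', 't'], ['D', 's'], ['R', 'g'], ['C', 'n'],
  ['N', 'h'], ['F', 'l'], ['M', 'c'], ['L', 'v'], ['T', 's'], ['O', 'g']]

-- A's inner "while … variable[i].isdigit(): i += 1" loop, step for step.
def pvSkipDigits : List Char → List Char
  | [] => []
  | c :: rest => if PySem.Chars.isdigit c then pvSkipDigits rest else c :: rest

-- needed only so pvAGo's termination can cite it
theorem pvSkipDigits_length_le (l : List Char) : (pvSkipDigits l).length ≤ l.length := by
  induction l with
  | nil => simp [pvSkipDigits]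
  | cons c rest ih =>
    simp only [pvSkipDigits]
    split
    · simp; omega
    · simp

-- A's outer while-loop over the suffix at index i, carrying has_element.
def pvAGo : List Char → Bool → Bool
  | [], he => he
  | c :: rest, he =>
    if PySem.Chars.isalpha c = false then
      pvAGo rest he          -- the "skip non-alphabetic" inner loop, one step
    else
      match rest with
      | d :: rest2 =>        -- i + 1 < len: try 2-character element first
        if pvElems.contains [c, d] then pvAGo (pvSkipDigits rest2) true
        else if pvElems.contains [c] then pvAGo (pvSkipDigits (d :: rest2)) true
        else pvAGo (d :: rest2) he
      | [] =>                -- only the 1-character element is tried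
        if pvElems.contains [c] then pvAGo (pvSkipDigits ([] : List Char)) true
        else pvAGo ([] : List Char) he
termination_by l _ => l.length
decreasing_by all_goals
  first
  | (have h := pvSkipDigits_length_le rest2; simp; omega)
  | (have h := pvSkipDigits_length_le (d :: rest2); simp at h ⊢; omega)
  | simp [pvSkipDigits]

def has_element_pattern_py (variable_ : String) : Bool :=
  pvAGo variable_.toList false

-- ===== PORT B =====
-- Source B: _SYMBOLS = "H He … Og".split(); return any(sym in variable for sym in _SYMBOLS)
def pvSymbolsStr : String :=
  "H He Li Be B C N O F Ne Na Mg Al Si P S Cl Ar K Ca Sc Ti V Cr Mn Fe Co Ni Cu Zn Ga Ge As Se Br Kr Rb Sr Y Zr Nb Mo Tc Ru Rh Pd Ag Cd In Sn Sb Te I Xe Cs Ba La Ce Pr Nd Pm Sm Eu Gd Tb Dy Ho Er Tm Yb Lu Hf Ta W Re Os Ir Pt Au Hg Tl Pb Bi Po At Rn Fr Ra Ac Th Pa U Np Pu Am Cm Bk Cf Es Fm Md No Lr Rf Db Sg Bh Hs Mt Ds Rg Cn Nh Fl Mc Lv Ts Og"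

def pvSymbols : List String := PySem.Str.split₀ pvSymbolsStr

def has_element_pattern_py_alt (variable_ : String) : Bool :=
  pvSymbols.any (fun sym => PySem.Str.isIn sym variable_)

-- ===== PRECONDITION & SPEC =====
def Spec_has_element_pattern_py (variable_ : String) (out : Bool) : Prop := out = has_element_pattern_py_alt variable_
instance (variable_ : String) (out : Bool) : Decidable (Spec_has_element_pattern_py variable_ out) := by unfold Spec_has_element_pattern_py; infer_instance

-- ===== CLAIM (what is proved, stated in full; the proofs are below) =====
def Claim_equal_has_element_pattern_py : Prop := ∀ (variable_ : String), Dom_has_element_pattern_py variable_ → Spec_has_element_pattern_py variable_ (has_element_pattern_py variable_)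

-- ===== LEMMAS AND PROOFS =====

-- proof-side abstraction of A: a stateless scan over the suffixes
def pvBGo : List Char → Bool
  | [] => false
  | c :: rest =>
    (pvElems.contains ((c :: rest).take 2) || pvElems.contains [c]) || pvBGo rest

-- every element symbol starts with an alphabetic character
theorem pvElems_head_alpha {c : Char} {t : List Char}
    (h : (c :: t) ∈ pvElems) : PySem.Chars.isalpha c = true := by
  have hall : pvElems.all (fun e => match e with
      | [] => false
      | a :: _ => PySem.Chars.isalpha a) = true := by decide
  simpa using List.all_eq_true.mp hall _ h

-- once has_element is True, A returns True
theorem pvAGo_true (l : List Char) : pvAGo l true = true := by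
  induction hn : l.length using Nat.strong_induction_on generalizing l with
  | _ n ih =>
  match l with
  | [] => simp [pvAGo]
  | c :: rest =>
    subst hn
    rw [pvAGo.eq_def]
    rcases rest with _ | ⟨d, rest2⟩
    · by_cases ha : PySem.Chars.isalpha c = true
      · by_cases h1 : [c] ∈ pvElems <;> simp [ha, h1, pvSkipDigits, pvAGo]
      · simp [ha, pvAGo]
    · by_cases ha : PySem.Chars.isalpha c = true
      · by_cases h2 : [c, d] ∈ pvElems
        · simp only [ha] at *
          simp [h2]
          exact ih _ (by have := pvSkipDigits_length_le rest2
                         simp only [List.length_cons]; omega) _ rfl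
        · by_cases h1 : [c] ∈ pvElems
          · simp [ha, h1, h2]
            exact ih _ (by have := pvSkipDigits_length_le (d :: rest2)
                           simp only [List.length_cons] at this ⊢; omega) _ rfl
          · simp [ha, h1, h2]
            exact ih _ (by simp) _ rfl
      · simp [ha]
        exact ih _ (by simp) _ rfl

-- the walker started with has_element = False computes exactly the stateless scan
theorem pvAGo_false (l : List Char) : pvAGo l false = pvBGo l := by
  induction hn : l.length using Nat.strong_induction_on generalizing l with
  | _ n ih =>
  match l with
  | [] => simp [pvAGo, pvBGo]
  | c :: rest =>
    subst hn
    rw [pvAGo.eq_def, pvBGo.eq_def]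
    by_cases ha : PySem.Chars.isalpha c = true
    · rcases rest with _ | ⟨d, rest2⟩
      · by_cases h1 : [c] ∈ pvElems <;>
          simp [ha, h1, pvSkipDigits, pvAGo, pvBGo]
      · by_cases h2 : [c, d] ∈ pvElems
        · simp [ha, h2, pvAGo_true]
        · by_cases h1 : [c] ∈ pvElems
          · simp [ha, h1, h2, pvAGo_true]
          · simp [ha, h1, h2]
            exact ih _ (by simp) _ rfl
    · -- c is not alphabetic: no element symbol can start here
      have ha' : PySem.Chars.isalpha c = false := by simpa using ha
      have hb : ∀ t : List Char, (c :: t) ∉ pvElems := fun t hmem =>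
        ha (pvElems_head_alpha hmem)
      simp only [ha', List.take_succ_cons]
      simp [hb (List.take 1 rest), hb []]
      exact ih _ (by simp) _ rfl

-- B's symbol list, read back as char-lists, is exactly the ELEMENTS list
set_option maxRecDepth 8000 in
theorem pvSymbols_toList : pvSymbols.map String.toList = pvElems := by decide

-- every element symbol has length 1 or 2
theorem pvElems_len : ∀ s ∈ pvElems, s.length = 1 ∨ s.length = 2 := by decide

-- the per-position check of the scan is "some symbol is a prefix here"
theorem pvStep_iff (c : Char) (rest : List Char) :
    (pvElems.contains ((c :: rest).take 2) || pvElems.contains [c]) = true ↔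
      ∃ s ∈ pvElems, s <+: c :: rest := by
  constructor
  · intro h
    rw [Bool.or_eq_true] at h
    rcases h with h | h
    · refine ⟨_, ?_, List.take_prefix 2 (c :: rest)⟩
      simpa using h
    · exact ⟨[c], by simpa using h, ⟨rest, rfl⟩⟩
  · rintro ⟨s, hs, hp⟩
    have heq : s = (c :: rest).take s.length := List.prefix_iff_eq_take.mp hp
    rw [Bool.or_eq_true]
    rcases pvElems_len s hs with h1 | h2
    · have : s = [c] := by rw [heq, h1]; simp
      subst this
      exact Or.inr (by simpa using hs)
    · have : s = (c :: rest).take 2 := by rw [heq, h2]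
      subst this
      exact Or.inl (by simpa using hs)

-- the stateless scan is "some symbol is an infix"
theorem pvBGo_iff (l : List Char) : pvBGo l = true ↔ ∃ s ∈ pvElems, s <:+: l := by
  induction l with
  | nil =>
    simp only [pvBGo]
    constructor
    · intro h; cases h
    · rintro ⟨s, hs, hi⟩
      have : s = [] := List.eq_nil_of_infix_nil hi
      subst this
      exact absurd hs (by decide)
  | cons c rest ih =>
    rw [pvBGo]
    rw [Bool.or_eq_true]
    constructor
    · rintro (h | h)
      · rcases (pvStep_iff c rest).mp h with ⟨s, hs, hp⟩
        exact ⟨s, hs, hp.isInfix⟩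
      · rcases ih.mp h with ⟨s, hs, hi⟩
        exact ⟨s, hs, hi.trans (List.suffix_cons c rest).isInfix⟩
    · rintro ⟨s, hs, hi⟩
      rcases List.infix_cons_iff.mp hi with hp | hi'
      · exact Or.inl ((pvStep_iff c rest).mpr ⟨s, hs, hp⟩)
      · exact Or.inr (ih.mpr ⟨s, hs, hi'⟩)

-- B computes the same predicate
theorem pvAlt_iff (v : String) :
    has_element_pattern_py_alt v = true ↔ ∃ s ∈ pvElems, s <:+: v.toList := by
  unfold has_element_pattern_py_alt
  rw [List.any_eq_true]
  constructor
  · rintro ⟨sym, hsym, h⟩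
    refine ⟨sym.toList, ?_, (PySem.Str.isIn_iff_infix sym v).mp h⟩
    rw [← pvSymbols_toList]
    exact List.mem_map_of_mem hsym
  · rintro ⟨s, hs, hi⟩
    rw [← pvSymbols_toList] at hs
    rcases List.mem_map.mp hs with ⟨sym, hsym, hmap⟩
    exact ⟨sym, hsym, (PySem.Str.isIn_iff_infix sym v).mpr (hmap ▸ hi)⟩

-- ===== VERDICT (by name: the statement is the Claim_ definition above) =====
theorem has_element_pattern_py_spec : Claim_equal_has_element_pattern_py := by
  intro v _
  unfold Spec_has_element_pattern_py has_element_pattern_py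
  rw [pvAGo_false]
  rw [Bool.eq_iff_iff, pvBGo_iff, pvAlt_iff]
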